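-- pv_equiv track=rewrite | github.com/shafieiali42/Computer-Vision-Algorithms | Vanishing Points and Lines /q1p1.py | filter_gap
-- ===== SOURCE A (Python) =====
-- def filter_gap(lines,distance_threshold):
--     drawed=[True for i in range(len(lines))]
--     for i in range(len(lines)):
--         for j in range(i+1,len(lines)):
--             r1=lines[i][0][0]
--             r2=lines[j][0][0]
--             if abs(r1 - r2) < distance_threshold:
--                 drawed[j] = False
--
--     new_lines=[]
--     for i in range(len(lines)):
--         if drawed[i]:
--             new_lines.append(lines[i])
--
--     return new_lines
-- ===== SOURCE B (Python) =====
-- def _bl(rs, r, lo, hi):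
--     # binary search: leftmost position in sorted rs where r could be inserted
--     if lo >= hi:
--         return lo
--     mid = (lo + hi) // 2
--     if rs[mid] < r:
--         return _bl(rs, r, mid + 1, hi)
--     else:
--         return _bl(rs, r, lo, mid)
--
--
-- def filter_gap(lines, distance_threshold):
--     rs = []  # sorted r-values of all lines seen so far
--     new_lines = []
--     for line in lines:
--         r = line[0][0]
--         i = _bl(rs, r, 0, len(rs))
--         near = (i < len(rs) and rs[i] - r < distance_threshold) or \
--                (i > 0 and r - rs[i - 1] < distance_threshold)
--         if not near:
--             new_lines.append(line)
--         rs.insert(i, r)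
--     return new_lines
-- ===== Notes on version B (the rewrite author's own statement) =====
-- stated objective: faster
-- what changed: Replaces the all-pairs nested marking loops with a single pass that keeps the r-values seen so far in a sorted list and decides each line by a binary-search nearest-neighbour test (only the two neighbours of r need checking).
-- outside the precondition, e.g. on filter_gap([[]], 1): A returns [[]], B raises IndexError; on filter_gap([[[]]], 1): A returns [[[]]], B raises IndexError
import Mathlib
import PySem

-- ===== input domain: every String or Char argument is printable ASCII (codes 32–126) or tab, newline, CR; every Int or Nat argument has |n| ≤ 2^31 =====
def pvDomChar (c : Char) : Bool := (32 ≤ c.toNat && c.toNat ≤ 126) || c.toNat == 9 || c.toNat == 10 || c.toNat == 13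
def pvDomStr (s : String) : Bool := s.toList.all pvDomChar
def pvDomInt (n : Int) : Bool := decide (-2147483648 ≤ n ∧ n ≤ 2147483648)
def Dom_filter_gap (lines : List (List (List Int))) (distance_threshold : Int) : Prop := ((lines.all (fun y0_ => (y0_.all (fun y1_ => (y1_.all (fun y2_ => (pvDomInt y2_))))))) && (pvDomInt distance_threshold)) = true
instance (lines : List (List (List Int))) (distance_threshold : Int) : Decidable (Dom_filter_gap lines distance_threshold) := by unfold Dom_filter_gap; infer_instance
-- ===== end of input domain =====

-- B replaces A's all-pairs nested marking loops by a single pass that keeps the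
-- previously seen r-values in a sorted list and tests each new r only against its two
-- binary-search neighbours (objective: faster).

-- ===== PORT A =====
def filter_gap (lines : List (List (List Int))) (distance_threshold : Int) : List (List (List Int)) :=
  let n : Int := (lines.length : Int)
  -- drawed = [True for i in range(len(lines))]
  let drawed : List Bool := (PySem.List.pyRange 0 n 1).map (fun _ => true)
  -- nested marking loops
  let drawed := (PySem.List.pyRange 0 n 1).foldl (fun d i =>
      (PySem.List.pyRange (i + 1) n 1).foldl (fun d j =>
        let r1 := PySem.List.pyGetD (PySem.List.pyGetD (PySem.List.pyGetD lines i []) 0 []) 0 0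
        let r2 := PySem.List.pyGetD (PySem.List.pyGetD (PySem.List.pyGetD lines j []) 0 []) 0 0
        if |r1 - r2| < distance_threshold then PySem.List.pySetD d j false else d) d) drawed
  -- collection loop
  (PySem.List.pyRange 0 n 1).foldl (fun new_lines i =>
      if PySem.List.pyGetD drawed i false then new_lines ++ [PySem.List.pyGetD lines i []]
      else new_lines) []

-- ===== PORT B =====
-- _bl: the hand-written recursive binary search from Source B (leftmost insertion point)
def pvBl (rs : List Int) (r lo hi : Int) : Int :=
  if lo ≥ hi then lo
  else
    let mid := PySem.Int.floordiv (lo + hi) 2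
    if PySem.List.pyGetD rs mid 0 < r then pvBl rs r (mid + 1) hi
    else pvBl rs r lo mid
termination_by (hi - lo).toNat
decreasing_by
  all_goals
    simp only [PySem.Int.floordiv_eq_ediv_of_pos (by norm_num : (0:Int) < 2)] at *
    omega

def filter_gap_alt (lines : List (List (List Int))) (distance_threshold : Int) : List (List (List Int)) :=
  let s := lines.foldl (fun (s : List Int × List (List (List Int))) line =>
      let rs := s.1
      let new_lines := s.2
      let r := PySem.List.pyGetD (PySem.List.pyGetD line 0 []) 0 0
      let i := pvBl rs r 0 (rs.length : Int)
      let near := (decide (i < (rs.length : Int)) && decide (PySem.List.pyGetD rs i 0 - r < distance_threshold)) ||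
                  (decide (0 < i) && decide (r - PySem.List.pyGetD rs (i - 1) 0 < distance_threshold))
      let new_lines := if near then new_lines else new_lines ++ [line]
      (PySem.List.insert rs i r, new_lines)) ([], [])
  s.2

-- ===== PRECONDITION & SPEC =====
-- Pre_ excludes the inputs where some line l has l == [] or l[0] == []: B always evaluates
-- line[0][0] and raises IndexError there; A also raises whenever it compares a pair (n >= 2),
-- but with fewer than two lines A never reads r-values and returns such a malformed line unread.
def Pre_filter_gap (lines : List (List (List Int))) (distance_threshold : Int) : Prop :=
  ∀ l ∈ lines, l ≠ [] ∧ l.getD 0 [] ≠ []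
instance (lines : List (List (List Int))) (distance_threshold : Int) : Decidable (Pre_filter_gap lines distance_threshold) := by unfold Pre_filter_gap; infer_instance

def pvWitness_filter_gap : List (List (List Int)) × Int := ([[[0]], [[2]], [[10]]], 3)

def Spec_filter_gap (lines : List (List (List Int))) (distance_threshold : Int) (out : List (List (List Int))) : Prop := out = filter_gap_alt lines distance_threshold
instance (lines : List (List (List Int))) (distance_threshold : Int) (out : List (List (List Int))) : Decidable (Spec_filter_gap lines distance_threshold out) := by unfold Spec_filter_gap; infer_instance

-- ===== CLAIM (what is proved, stated in full; the proofs are below) =====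
def Claim_equal_filter_gap : Prop := ∀ (lines : List (List (List Int))) (distance_threshold : Int), Dom_filter_gap lines distance_threshold → Pre_filter_gap lines distance_threshold → Spec_filter_gap lines distance_threshold (filter_gap lines distance_threshold)

-- ===== LEMMAS AND PROOFS =====

-- r-value of one line, totalized exactly as both ports totalize line[0][0]
def pvRv (l : List (List Int)) : Int := (l.getD 0 []).getD 0 0

-- the int A's inner loops read for an index i (exact pyGetD chain of port A)
def pvGvI (lines : List (List (List Int))) (i : Int) : Int :=
  PySem.List.pyGetD (PySem.List.pyGetD (PySem.List.pyGetD lines i []) 0 []) 0 0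

-- reference recursion both ports are reduced to:
-- keep a line iff its r is far from every previously seen r
def pvRef (t : Int) : List (List (List Int)) → List Int → List (List (List Int))
  | [], _ => []
  | l :: ls, prev =>
    if ∀ r' ∈ prev, t ≤ |pvRv l - r'| then l :: pvRef t ls (prev ++ [pvRv l])
    else pvRef t ls (prev ++ [pvRv l])

theorem pvMono (rs : List Int) (hs : rs.Pairwise (· ≤ ·)) (i j : Nat)
    (hij : i ≤ j) (hj : j < rs.length) : rs[i] ≤ rs[j] := by
  rcases Nat.lt_or_ge i j with h | h
  · exact (List.pairwise_iff_getElem.mp hs) i j (by omega) hj h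
  · have : i = j := by omega
    subst this; rfl


theorem pvBl_spec (rs : List Int) (r : Int) (hs : rs.Pairwise (· ≤ ·)) :
    ∀ (lo hi : Int), 0 ≤ lo → lo ≤ hi → hi ≤ (rs.length : Int) →
    (∀ (j : Nat) (hj : j < rs.length), (j : Int) < lo → rs[j] < r) →
    (∀ (j : Nat) (hj : j < rs.length), hi ≤ (j : Int) → r ≤ rs[j]) →
    0 ≤ pvBl rs r lo hi ∧ pvBl rs r lo hi ≤ (rs.length : Int) ∧
    (∀ (j : Nat) (hj : j < rs.length), (j : Int) < pvBl rs r lo hi → rs[j] < r) ∧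
    (∀ (j : Nat) (hj : j < rs.length), pvBl rs r lo hi ≤ (j : Int) → r ≤ rs[j]) := by
  intro lo hi
  induction lo, hi using pvBl.induct rs r with
  | case1 lo hi h =>
    intro h0 hlh hhi hbelow habove
    rw [pvBl, if_pos h]
    exact ⟨h0, by omega, fun j hj hjlt => hbelow j hj hjlt, fun j hj hjle => habove j hj (by omega)⟩
  | case2 lo hi h mid hc ih =>
    intro h0 hlh hhi hbelow habove
    have hb := PySem.Int.floordiv_two_mid_bounds (lo := lo) (hi := hi) hlh
    have hmlt : mid < hi := by
      show PySem.Int.floordiv (lo + hi) 2 < hi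
      rw [PySem.Int.floordiv_eq_ediv_of_pos (by norm_num : (0:Int) < 2)]
      omega
    have hmlen : mid.toNat < rs.length := by omega
    have hgm : PySem.List.pyGetD rs mid 0 = rs[mid.toNat] :=
      PySem.List.pyGetD_eq_getElem rs 0 (by omega) (by omega)
    rw [hgm] at hc
    have step : pvBl rs r lo hi = pvBl rs r (mid + 1) hi := by
      rw [pvBl, if_neg h]
      simp only []
      rw [if_pos (hgm ▸ hc)]
    rw [step]
    exact ih (by omega) (by omega) hhi
      (fun j hj hjlt => by
        rcases Int.lt_or_le (j : Int) lo with h' | h'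
        · exact hbelow j hj h'
        · calc rs[j] ≤ rs[mid.toNat] := pvMono rs hs j mid.toNat (by omega) hmlen
               _ < r := hc)
      habove
  | case3 lo hi h mid hc ih =>
    intro h0 hlh hhi hbelow habove
    have hb := PySem.Int.floordiv_two_mid_bounds (lo := lo) (hi := hi) hlh
    have hmlt : mid < hi := by
      show PySem.Int.floordiv (lo + hi) 2 < hi
      rw [PySem.Int.floordiv_eq_ediv_of_pos (by norm_num : (0:Int) < 2)]
      omega
    have hmlen : mid.toNat < rs.length := by omega
    have hgm : PySem.List.pyGetD rs mid 0 = rs[mid.toNat] :=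
      PySem.List.pyGetD_eq_getElem rs 0 (by omega) (by omega)
    rw [hgm] at hc
    have hrm : r ≤ rs[mid.toNat] := by omega
    have step : pvBl rs r lo hi = pvBl rs r lo mid := by
      rw [pvBl, if_neg h]
      simp only []
      rw [if_neg (hgm ▸ hc)]
    rw [step]
    exact ih h0 (by omega) (by omega) hbelow
      (fun j hj hjge => by
        calc r ≤ rs[mid.toNat] := hrm
             _ ≤ rs[j] := pvMono rs hs mid.toNat j (by omega) hj)

theorem pvNear_iff (rs : List Int) (hs : rs.Pairwise (· ≤ ·)) (r t : Int)
    (i : Int) (h0 : 0 ≤ i) (hle : i ≤ (rs.length : Int))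
    (hlt : ∀ (j : Nat) (hj : j < rs.length), (j : Int) < i → rs[j] < r)
    (hge : ∀ (j : Nat) (hj : j < rs.length), i ≤ (j : Int) → r ≤ rs[j]) :
    (((decide (i < (rs.length : Int)) && decide (PySem.List.pyGetD rs i 0 - r < t)) ||
      (decide (0 < i) && decide (r - PySem.List.pyGetD rs (i - 1) 0 < t))) = true) ↔
    ∃ r' ∈ rs, |r - r'| < t := by
  constructor
  · intro hnear
    simp only [Bool.or_eq_true, Bool.and_eq_true, decide_eq_true_eq] at hnear
    rcases hnear with ⟨hilen, hdist⟩ | ⟨hipos, hdist⟩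
    · have hi' : i.toNat < rs.length := by omega
      rw [PySem.List.pyGetD_eq_getElem rs 0 h0 (by omega)] at hdist
      refine ⟨rs[i.toNat], List.getElem_mem _, ?_⟩
      have := hge i.toNat hi' (by omega)
      rw [abs_of_nonpos (by omega)]; omega
    · have hi1 : (i - 1).toNat < rs.length := by omega
      rw [PySem.List.pyGetD_eq_getElem rs 0 (by omega) (by omega)] at hdist
      refine ⟨rs[(i-1).toNat], List.getElem_mem _, ?_⟩
      have := hlt (i-1).toNat hi1 (by omega)
      rw [abs_of_nonneg (by omega)]; omega
  · rintro ⟨r', hmem, hdist⟩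
    obtain ⟨k, hk, rfl⟩ := List.mem_iff_getElem.mp hmem
    simp only [Bool.or_eq_true, Bool.and_eq_true, decide_eq_true_eq]
    rcases Int.lt_or_le (k : Int) i with h' | h'
    · refine Or.inr ⟨by omega, ?_⟩
      have hi1 : (i - 1).toNat < rs.length := by omega
      rw [PySem.List.pyGetD_eq_getElem rs 0 (by omega) (by omega)]
      have h2 : rs[k] ≤ rs[(i-1).toNat] := pvMono rs hs k _ (by omega) hi1
      have h3 : rs[k] < r := hlt k hk h'
      have h4 : |r - rs[k]| = r - rs[k] := abs_of_nonneg (by omega)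
      omega
    · refine Or.inl ⟨by omega, ?_⟩
      have hi' : i.toNat < rs.length := by omega
      rw [PySem.List.pyGetD_eq_getElem rs 0 (by omega) (by omega)]
      have hik : i.toNat ≤ k := by omega
      have h2 : rs[i.toNat] ≤ rs[k] := pvMono rs hs i.toNat k hik hk
      have h3 : r ≤ rs[k] := hge k hk h'
      have h4 := abs_of_nonpos (show r - rs[k] ≤ 0 by omega)
      omega

def pvStep (t : Int) (s : List Int × List (List (List Int))) (line : List (List Int)) :
    List Int × List (List (List Int)) :=
  let rs := s.1
  let new_lines := s.2
  let r := PySem.List.pyGetD (PySem.List.pyGetD line 0 []) 0 0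
  let i := pvBl rs r 0 (rs.length : Int)
  let near := (decide (i < (rs.length : Int)) && decide (PySem.List.pyGetD rs i 0 - r < t)) ||
              (decide (0 < i) && decide (r - PySem.List.pyGetD rs (i - 1) 0 < t))
  let new_lines := if near then new_lines else new_lines ++ [line]
  (PySem.List.insert rs i r, new_lines)

theorem pvB_go (t : Int) (ls : List (List (List Int))) :
    ∀ (rs prev : List Int) (out : List (List (List Int))),
    rs.Perm prev → rs.Pairwise (· ≤ ·) →
    (ls.foldl (pvStep t) (rs, out)).2 = out ++ pvRef t ls prev := by
  induction ls with
  | nil => intro rs prev out _ _; simp [pvRef]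
  | cons l ls IH =>
    intro rs prev out hperm hs
    have hr : PySem.List.pyGetD (PySem.List.pyGetD l 0 []) 0 0 = pvRv l := by
      simp [PySem.List.pyGetD_zero, pvRv]
    set r := PySem.List.pyGetD (PySem.List.pyGetD l 0 []) 0 0 with hrdef
    obtain ⟨h0, hle, hlt, hge⟩ := pvBl_spec rs r hs 0 (rs.length : Int)
      le_rfl (by positivity) le_rfl
      (fun j hj hjlt => absurd hjlt (by omega))
      (fun j hj hjge => absurd hjge (by omega))
    set i := pvBl rs r 0 (rs.length : Int) with hidef
    have hins : PySem.List.insert rs i r = rs.take i.toNat ++ r :: rs.drop i.toNat := by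
      have := PySem.List.insert_natCast rs i.toNat r (by omega)
      rwa [show ((i.toNat : Int)) = i by omega] at this
    have htd : rs.take i.toNat ++ rs.drop i.toNat = rs := List.take_append_drop _ _
    have hperm' : (PySem.List.insert rs i r).Perm (prev ++ [r]) := by
      rw [hins]
      refine List.perm_middle.trans ?_
      rw [htd]
      exact (hperm.cons r).trans (List.perm_append_singleton r prev).symm
    have hsorted' : (PySem.List.insert rs i r).Pairwise (· ≤ ·) := by
      rw [hins]
      refine List.pairwise_append.mpr ⟨hs.sublist (List.take_sublist _ _), ?_, ?_⟩
      · refine List.pairwise_cons.mpr ⟨?_, hs.sublist (List.drop_sublist _ _)⟩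
        intro y hy
        obtain ⟨m, hm, rfl⟩ := List.mem_iff_getElem.mp hy
        simp only [List.length_drop] at hm
        rw [List.getElem_drop]
        exact hge _ (by omega) (by omega)
      · intro x hx y hy
        obtain ⟨m, hm, rfl⟩ := List.mem_iff_getElem.mp hx
        simp only [List.length_take] at hm
        rw [List.getElem_take]
        have hxlt : rs[m]'(by omega) < r := hlt _ (by omega) (by omega)
        rcases List.mem_cons.mp hy with rfl | hy'
        · exact le_of_lt hxlt
        · obtain ⟨p, hp, rfl⟩ := List.mem_iff_getElem.mp hy'
          simp only [List.length_drop] at hp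
          rw [List.getElem_drop]
          exact le_of_lt (lt_of_lt_of_le hxlt (hge _ (by omega) (by omega)))
    have hnear := pvNear_iff rs hs r t i h0 hle hlt hge
    have hstep : pvStep t (rs, out) l =
      (PySem.List.insert rs i r,
        if ((decide (i < (rs.length : Int)) && decide (PySem.List.pyGetD rs i 0 - r < t)) ||
            (decide (0 < i) && decide (r - PySem.List.pyGetD rs (i - 1) 0 < t)))
        then out else out ++ [l]) := rfl
    rw [List.foldl_cons, hstep]
    by_cases hfar : ∀ r' ∈ prev, t ≤ |pvRv l - r'|
    · have hnf : ((decide (i < (rs.length : Int)) && decide (PySem.List.pyGetD rs i 0 - r < t)) ||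
            (decide (0 < i) && decide (r - PySem.List.pyGetD rs (i - 1) 0 < t))) = false := by
        rw [← Bool.not_eq_true, hnear]
        push Not
        intro r' hr'
        have h5 := hfar r' (hperm.mem_iff.mp hr')
        rw [hr]
        omega
      rw [hnf]
      simp only [Bool.false_eq_true, if_false]
      rw [IH _ (prev ++ [r]) _ hperm' hsorted']
      simp only [pvRef]
      rw [if_pos hfar, List.append_assoc, hr]
      rfl
    · have hnt : ((decide (i < (rs.length : Int)) && decide (PySem.List.pyGetD rs i 0 - r < t)) ||
            (decide (0 < i) && decide (r - PySem.List.pyGetD rs (i - 1) 0 < t))) = true := by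
        rw [hnear]
        push Not at hfar
        obtain ⟨r', hr', hclose⟩ := hfar
        refine ⟨r', hperm.mem_iff.mpr hr', ?_⟩
        rw [hr]
        omega
      rw [hnt]
      simp only [if_true]
      rw [IH _ (prev ++ [r]) _ hperm' hsorted']
      simp only [pvRef]
      rw [if_neg hfar, hr]

theorem pvGvI_natCast (lines : List (List (List Int))) (k : Nat) :
    pvGvI lines (k : Int) = pvRv (lines.getD k []) := by
  simp [pvGvI, pvRv, PySem.List.pyGetD_natCast, PySem.List.pyGetD_zero]


theorem pvInner_char (c : Int → Prop) [DecidablePred c] (b : Int) :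
    ∀ (a : Int) (d : List Bool), 0 ≤ a → ∀ (k : Nat),
    ((PySem.List.pyRange a b 1).foldl
        (fun d j => if c j then PySem.List.pySetD d j false else d) d).getD k false =
      if a ≤ (k : Int) ∧ (k : Int) < b ∧ c (k : Int) then false else d.getD k false := by
  intro a d ha k
  by_cases hab : b ≤ a
  · rw [PySem.List.pyRange_one_eq_nil hab]
    simp only [List.foldl_nil]
    rw [if_neg (by omega)]
  · have : ((b - (a+1)).toNat) < ((b - a).toNat) := by omega
    rw [PySem.List.pyRange_one_cons (by omega : a < b), List.foldl_cons]
    have hrec := pvInner_char c b (a + 1)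
      (if c a then PySem.List.pySetD d a false else d) (by omega) k
    rw [hrec]
    by_cases hca : c a
    · rw [if_pos hca]
      by_cases hk : (k : Int) = a
      · rw [if_neg (by omega), if_pos (by exact ⟨by omega, by omega, by rwa [hk]⟩)]
        rw [PySem.List.pySetD_of_nonneg d false ha]
        by_cases hkl : k < d.length
        · rw [List.getD_eq_getElem _ _ (by simpa using hkl)]
          rw [List.getElem_set]
          rw [if_pos (by omega)]
        · rw [List.getD_eq_default _ _ (by simpa using hkl)]
      · rw [PySem.List.pySetD_of_nonneg d false ha]
        have hgd : (d.set a.toNat false).getD k false = d.getD k false := by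
          by_cases hkl : k < d.length
          · rw [List.getD_eq_getElem _ _ (by simpa using hkl),
              List.getD_eq_getElem _ _ hkl, List.getElem_set, if_neg (by omega)]
          · rw [List.getD_eq_default _ _ (by simpa using hkl),
              List.getD_eq_default _ _ (by simpa using hkl)]
        rw [hgd]
        by_cases h1 : a + 1 ≤ (k : Int) ∧ (k : Int) < b ∧ c (k : Int)
        · rw [if_pos h1, if_pos ⟨by omega, h1.2⟩]
        · rw [if_neg h1, if_neg (by intro h2; exact h1 ⟨by omega, h2.2⟩)]
    · rw [if_neg hca]
      by_cases h1 : a + 1 ≤ (k : Int) ∧ (k : Int) < b ∧ c (k : Int)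
      · rw [if_pos h1, if_pos ⟨by omega, h1.2⟩]
      · rw [if_neg h1, if_neg (by
          intro h2
          apply h1
          refine ⟨?_, h2.2⟩
          rcases h2 with ⟨ha2, hb2, hc2⟩
          rcases eq_or_lt_of_le ha2 with heq | hlt
          · exact absurd (heq ▸ hc2) hca
          · omega)]
termination_by a => (b - a).toNat

theorem pvOuter_char (lines : List (List (List Int))) (t : Int) :
    ∀ (a : Int) (d : List Bool), 0 ≤ a →
    (∀ k : Nat, d.getD k false =
      if k < lines.length then
        !decide (∃ m : Nat, m < k ∧ (m : Int) < a ∧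
          |pvRv (lines.getD m []) - pvRv (lines.getD k [])| < t)
      else false) →
    ∀ k : Nat,
    ((PySem.List.pyRange a (lines.length : Int) 1).foldl
      (fun d i => (PySem.List.pyRange (i + 1) (lines.length : Int) 1).foldl
        (fun d j => if |pvGvI lines i - pvGvI lines j| < t then PySem.List.pySetD d j false else d) d)
      d).getD k false
    = if k < lines.length then
        !decide (∃ m : Nat, m < k ∧ |pvRv (lines.getD m []) - pvRv (lines.getD k [])| < t)
      else false := by
  intro a d ha hinv k
  by_cases hab : (lines.length : Int) ≤ a
  · rw [PySem.List.pyRange_one_eq_nil hab]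
    simp only [List.foldl_nil]
    rw [hinv k]
    by_cases hk : k < lines.length
    · rw [if_pos hk, if_pos hk]
      congr 1
      rw [decide_eq_decide]
      constructor
      · rintro ⟨m, hm, _, hc⟩; exact ⟨m, hm, hc⟩
      · rintro ⟨m, hm, hc⟩; exact ⟨m, hm, by omega, hc⟩
    · rw [if_neg hk, if_neg hk]
  · have hterm : (((lines.length : Int) - (a + 1)).toNat) < (((lines.length : Int) - a).toNat) := by
      omega
    rw [PySem.List.pyRange_one_cons (by omega : a < (lines.length : Int)), List.foldl_cons]
    apply pvOuter_char lines t (a + 1) _ (by omega)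
    -- re-establish the invariant after the inner loop for index a
    intro k'
    rw [pvInner_char (fun j => |pvGvI lines a - pvGvI lines j| < t)
        (lines.length : Int) (a + 1) d (by omega) k']
    rw [hinv k']
    by_cases hk' : k' < lines.length
    · rw [if_pos hk']
      have hcast : pvGvI lines ((k' : Nat) : Int) = pvRv (lines.getD k' []) := pvGvI_natCast lines k'
      have hacast : pvGvI lines a = pvRv (lines.getD a.toNat []) := by
        conv_lhs => rw [show a = ((a.toNat : Nat) : Int) from by omega]
        exact pvGvI_natCast lines a.toNat
      by_cases hcond : a + 1 ≤ (k' : Int) ∧ (k' : Int) < (lines.length : Int) ∧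
          |pvGvI lines a - pvGvI lines (k' : Int)| < t
      · rw [if_pos hcond, if_pos hk']
        have : ∃ m : Nat, m < k' ∧ (m : Int) < a + 1 ∧
            |pvRv (lines.getD m []) - pvRv (lines.getD k' [])| < t := by
          refine ⟨a.toNat, by omega, by omega, ?_⟩
          rw [← hacast, ← hcast]
          exact hcond.2.2
        rw [eq_comm, Bool.not_eq_false', decide_eq_true_eq]
        exact this
      · rw [if_neg hcond, if_pos hk']
        congr 1
        rw [decide_eq_decide]
        constructor
        · rintro ⟨m, hm, hma, hc⟩; exact ⟨m, hm, by omega, hc⟩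
        · rintro ⟨m, hm, hma, hc⟩
          refine ⟨m, hm, ?_, hc⟩
          rcases Int.lt_or_le (m : Int) a with h' | h'
          · exact h'
          · exfalso
            have hma' : (m : Int) = a := by omega
            apply hcond
            refine ⟨by omega, by omega, ?_⟩
            · rw [hacast, hcast]
              have : lines.getD a.toNat [] = lines.getD m [] := by rw [show a.toNat = m by omega]
              rw [this]
              exact hc
    · rw [if_neg hk', if_neg hk', if_neg (by push Not; intro _ h2; omega)]
termination_by a => ((lines.length : Int) - a).toNat

theorem pvStruct (t : Int) :
    ∀ (ls : List (List (List Int))) (prev : List Int),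
    ((List.range ls.length).filter (fun k =>
        !decide (∃ r' ∈ prev ++ ((ls.map pvRv).take k), |pvRv (ls.getD k []) - r'| < t))).map
      (fun k => ls.getD k []) = pvRef t ls prev := by
  intro ls
  induction ls with
  | nil => intro prev; simp [pvRef]
  | cons l ls IH =>
    intro prev
    rw [List.length_cons, List.range_succ_eq_map, List.filter_cons]
    have hhead : (!decide (∃ r' ∈ prev ++ (((l :: ls).map pvRv).take 0),
        |pvRv ((l :: ls).getD 0 []) - r'| < t)) =
        !decide (∃ r' ∈ prev, |pvRv l - r'| < t) := by
      simp
    have htail : ((List.range ls.length).map Nat.succ).filter (fun k =>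
        !decide (∃ r' ∈ prev ++ (((l :: ls).map pvRv).take k),
          |pvRv ((l :: ls).getD k []) - r'| < t)) =
        ((List.range ls.length).filter (fun k =>
          !decide (∃ r' ∈ (prev ++ [pvRv l]) ++ ((ls.map pvRv).take k),
            |pvRv (ls.getD k []) - r'| < t))).map Nat.succ := by
      rw [List.filter_map]
      congr 1
      apply List.filter_congr
      intro k hk
      simp only [Function.comp_apply, List.map_cons, List.take_succ_cons, List.getD_cons_succ]
      congr 1
      rw [decide_eq_decide]
      constructor
      · rintro ⟨r', hr', hc⟩
        refine ⟨r', ?_, hc⟩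
        simp only [List.append_assoc, List.singleton_append] at *
        exact hr'
      · rintro ⟨r', hr', hc⟩
        refine ⟨r', ?_, hc⟩
        simp only [List.append_assoc, List.singleton_append] at *
        exact hr'
    by_cases hfar : ∀ r' ∈ prev, t ≤ |pvRv l - r'|
    · have h0 : (!decide (∃ r' ∈ prev ++ (((l :: ls).map pvRv).take 0),
          |pvRv ((l :: ls).getD 0 []) - r'| < t)) = true := by
        rw [hhead, Bool.not_eq_true', decide_eq_false_iff_not]
        push Not
        intro r' hr'
        exact hfar r' hr'
      rw [if_pos h0]
      rw [List.map_cons, htail, List.map_map]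
      have : ((fun k => (l :: ls).getD k []) ∘ Nat.succ) = (fun k => ls.getD k []) := by
        funext k; simp
      rw [this, IH (prev ++ [pvRv l])]
      simp only [pvRef]
      rw [if_pos hfar]
      simp
    · have h0 : (!decide (∃ r' ∈ prev ++ (((l :: ls).map pvRv).take 0),
          |pvRv ((l :: ls).getD 0 []) - r'| < t)) = false := by
        rw [hhead, Bool.not_eq_false', decide_eq_true_eq]
        push Not at hfar
        obtain ⟨r', hr', hc⟩ := hfar
        exact ⟨r', hr', by omega⟩
      rw [if_neg (by rw [h0]; exact fun h => nomatch h)]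
      rw [htail, List.map_map]
      have : ((fun k => (l :: ls).getD k []) ∘ Nat.succ) = (fun k => ls.getD k []) := by
        funext k; simp
      rw [this, IH (prev ++ [pvRv l])]
      simp only [pvRef]
      rw [if_neg hfar]


def pvD0 (lines : List (List (List Int))) : List Bool :=
  (PySem.List.pyRange 0 (lines.length : Int) 1).map (fun _ => true)

def pvDF (lines : List (List (List Int))) (t : Int) : List Bool :=
  (PySem.List.pyRange 0 (lines.length : Int) 1).foldl (fun d i =>
      (PySem.List.pyRange (i + 1) (lines.length : Int) 1).foldl (fun d j =>
        if |pvGvI lines i - pvGvI lines j| < t then PySem.List.pySetD d j false else d) d)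
    (pvD0 lines)

theorem pvD0_char (lines : List (List (List Int))) (t : Int) (k : Nat) :
    (pvD0 lines).getD k false =
      if k < lines.length then
        !decide (∃ m : Nat, m < k ∧ (m : Int) < 0 ∧
          |pvRv (lines.getD m []) - pvRv (lines.getD k [])| < t) else false := by
  have hlen : (pvD0 lines).length = lines.length := by
    simp [pvD0, PySem.List.length_pyRange_one]
  by_cases hk : k < lines.length
  · rw [if_pos hk]
    rw [List.getD_eq_getElem _ _ (by omega)]
    simp [pvD0]
  · rw [if_neg hk, List.getD_eq_default _ _ (by omega)]

theorem pvA_eq_ref (lines : List (List (List Int))) (t : Int) :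
    filter_gap lines t = pvRef t lines [] := by
  show (PySem.List.pyRange 0 (lines.length : Int) 1).foldl
      (fun new_lines i => if PySem.List.pyGetD (pvDF lines t) i false
        then new_lines ++ [PySem.List.pyGetD lines i []] else new_lines) [] = pvRef t lines []
  have hD : ∀ k : Nat, (pvDF lines t).getD k false =
      if k < lines.length then
        !decide (∃ m : Nat, m < k ∧ |pvRv (lines.getD m []) - pvRv (lines.getD k [])| < t)
      else false :=
    fun k => pvOuter_char lines t 0 (pvD0 lines) le_rfl (fun k' => pvD0_char lines t k') k
  rw [PySem.List.foldl_append_if (fun i => PySem.List.pyGetD (pvDF lines t) i false)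
    (fun i => PySem.List.pyGetD lines i []) _ []]
  rw [List.nil_append, PySem.List.pyRange_zero_nat lines.length, List.filter_map, List.map_map]
  rw [← pvStruct t lines []]
  have hfilter : (List.range lines.length).filter
        ((fun i => PySem.List.pyGetD (pvDF lines t) i false) ∘ (fun k : Nat => (k : Int))) =
      (List.range lines.length).filter (fun k =>
        !decide (∃ r' ∈ ([] : List Int) ++ ((lines.map pvRv).take k),
          |pvRv (lines.getD k []) - r'| < t)) := by
    apply List.filter_congr
    intro k hk
    have hkN : k < lines.length := List.mem_range.mp hk
    simp only [Function.comp_apply, PySem.List.pyGetD_natCast]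
    rw [hD k, if_pos hkN]
    congr 1
    rw [decide_eq_decide]
    constructor
    · rintro ⟨m, hm, hc⟩
      refine ⟨pvRv (lines.getD m []), ?_, by rw [abs_sub_comm] at hc; exact hc⟩
      simp only [List.nil_append]
      refine List.mem_iff_getElem.mpr ⟨m, ?_, ?_⟩
      · simp only [List.length_take, List.length_map]; omega
      · rw [List.getElem_take, List.getElem_map]
        rw [List.getD_eq_getElem _ _ (by omega)]
    · rintro ⟨r', hr', hc⟩
      simp only [List.nil_append] at hr'
      obtain ⟨m, hmlen, rfl⟩ := List.mem_iff_getElem.mp hr'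
      simp only [List.length_take, List.length_map] at hmlen
      rw [List.getElem_take, List.getElem_map] at hc
      refine ⟨m, by omega, ?_⟩
      rw [abs_sub_comm] at hc
      rw [List.getD_eq_getElem _ _ (by omega)]
      exact hc
  rw [hfilter]
  apply List.map_congr_left
  intro k hk
  simp only [Function.comp_apply, PySem.List.pyGetD_natCast]

theorem pvB_eq_ref (lines : List (List (List Int))) (t : Int) :
    filter_gap_alt lines t = pvRef t lines [] := by
  show (lines.foldl (pvStep t) ([], [])).2 = pvRef t lines []
  rw [pvB_go t lines [] [] [] (List.Perm.refl _) List.Pairwise.nil]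
  rfl

-- ===== VERDICT (by name: the statement is the Claim_ definition above) =====
theorem filter_gap_spec : Claim_equal_filter_gap := by
  intro lines t _ _
  unfold Spec_filter_gap
  rw [pvB_eq_ref, pvA_eq_ref]
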